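-- pv_equiv track=rewrite | github.com/wiegerw/nerva | python/make_packages.py | split_imports
-- ===== SOURCE A (Python) =====
-- from typing import Tuple
--
-- def split_imports(text: str) -> Tuple[str, str]:
--     lines = text.split('\n')
--     imports = []
--     code = []
--
--     def is_import(line: str):
--         return line.startswith('import ') or line.startswith('from ') or line.isspace() or not line
--
--     inside_imports = True
--     for line in lines:
--         if not is_import(line):
--             inside_imports = False
--         if inside_imports:
--             imports.append(line)
--         else:
--             code.append(line)
--
--     return '\n'.join(imports).strip(), '\n'.join(code).strip()
-- ===== SOURCE B (Python) =====
-- def split_imports(text):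
--     def is_import(line: str):
--         return line.startswith('import ') or line.startswith('from ') or line.isspace() or not line
--
--     imports = ''
--     rest = text
--     while True:
--         head, sep, tail = rest.partition('\n')
--         if not is_import(head):
--             break
--         imports += head + sep
--         rest = tail
--         if not sep:
--             break
--     return imports.strip(), rest.strip()
-- ===== Notes on version B (the rewrite author's own statement) =====
-- stated objective: alternative
-- what changed: B never builds a list of lines: it consumes the raw string with str.partition, accumulating the import prefix and keeping the remainder as an unsplit suffix, so A's split/flag/two-list/join pipeline disappears.
import Mathlib
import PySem

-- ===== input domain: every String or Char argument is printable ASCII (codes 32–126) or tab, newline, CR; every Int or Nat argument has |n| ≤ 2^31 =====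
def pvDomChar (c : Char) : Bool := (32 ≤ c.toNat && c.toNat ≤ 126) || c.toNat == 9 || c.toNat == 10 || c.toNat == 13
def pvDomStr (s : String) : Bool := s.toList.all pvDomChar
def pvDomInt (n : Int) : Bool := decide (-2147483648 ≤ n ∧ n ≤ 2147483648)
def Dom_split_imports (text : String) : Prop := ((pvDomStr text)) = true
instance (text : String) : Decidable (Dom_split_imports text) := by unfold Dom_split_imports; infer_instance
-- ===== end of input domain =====

-- B consumes the raw string with str.partition, accumulating the import prefix
-- and keeping the remainder as an unsplit suffix, instead of A's split-into-lines /
-- flag / two-list / join pipeline; objective: alternative (same cost).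

-- ===== PORT A =====
-- is_import(line): line.startswith('import ') or line.startswith('from ') or line.isspace() or not line
def pvIsImport (line : String) : Bool :=
  PySem.Str.startswith line "import " || PySem.Str.startswith line "from " ||
    PySem.Str.strIsspace line || line == ""

-- the for-loop over lines with state (inside_imports, imports, code)
def pvLoopA (st : Bool × List String × List String) (lines : List String) :
    Bool × List String × List String :=
  lines.foldl (fun (st : Bool × List String × List String) line =>
    let inside := if ¬ pvIsImport line then false else st.1
    if inside then (inside, st.2.1 ++ [line], st.2.2)
    else (inside, st.2.1, st.2.2 ++ [line])) st

def split_imports (text : String) : String × String :=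
  let lines := (PySem.Str.split? text "\n").getD []  -- sep ≠ "", so split? = some
  let st := pvLoopA (true, [], []) lines
  (PySem.Str.strip (PySem.Str.join "\n" st.2.1),
   PySem.Str.strip (PySem.Str.join "\n" st.2.2))

-- ===== PORT B =====
-- is_import on the char-list side (PySem.Str.* are thin wrappers over PySem.Chars.*)
def pvIsImportC (line : List Char) : Bool :=
  PySem.Chars.startswith line "import ".toList || PySem.Chars.startswith line "from ".toList ||
    PySem.Chars.strIsspace line || line.isEmpty

-- the while-True loop over (imports, rest); rest.partition('\n') is exactly
-- (takeWhile (· != '\n'), first '\n' if any, the rest after it) for the 1-char separator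
def pvLoopB (imports rest : List Char) : List Char × List Char :=
  let head := rest.takeWhile (· != '\n')
  if ¬ pvIsImportC head then (imports, rest)              -- break at first non-import line
  else
    match h : rest.dropWhile (· != '\n') with
    | [] => (imports ++ head, [])                         -- sep == '': imports += head; rest = ''; break
    | _ :: tail => pvLoopB (imports ++ head ++ ['\n']) tail   -- imports += head + '\n'; rest = tail
termination_by rest.length
decreasing_by
  have h1 := List.length_dropWhile_le (fun c => c != '\n') rest
  rw [h] at h1
  simp at h1
  omega

def split_imports_alt (text : String) : String × String :=
  let pr := pvLoopB [] text.toList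
  (String.ofList (PySem.Chars.strip pr.1), String.ofList (PySem.Chars.strip pr.2))

-- ===== PRECONDITION & SPEC =====
def Spec_split_imports (text : String) (out : String × String) : Prop := out = split_imports_alt text
instance (text : String) (out : String × String) : Decidable (Spec_split_imports text out) := by unfold Spec_split_imports; infer_instance

-- ===== CLAIM (what is proved, stated in full; the proofs are below) =====
def Claim_equal_split_imports : Prop := ∀ (text : String), Dom_split_imports text → Spec_split_imports text (split_imports text)

-- ===== LEMMAS AND PROOFS =====

-- reference splitter: text.split('\n') on the char-list side, structurally
def pvNlSplit : List Char → List (List Char)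
  | [] => [[]]
  | c :: t => if c == '\n' then [] :: pvNlSplit t else (pvNlSplit t).modifyHead (c :: ·)

lemma pvNlSplit_ne_nil (cs : List Char) : pvNlSplit cs ≠ [] := by
  cases cs with
  | nil => simp [pvNlSplit]
  | cons c t =>
      by_cases h : c = '\n'
      · simp [pvNlSplit, h]
      · cases he : pvNlSplit t with
        | nil => exact absurd he (pvNlSplit_ne_nil t)
        | cons a b => simp [pvNlSplit, h, he]

-- Chars.splitOn.go with enough fuel computes pvNlSplit
lemma pvGo_spec (l : List Char) : ∀ (fuel : Nat) (cur : List Char) (acc : List (List Char)),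
    l.length < fuel →
    PySem.Chars.splitOn.go ['\n'] fuel l cur acc
      = acc.reverse ++ (pvNlSplit l).modifyHead (cur.reverse ++ ·) := by
  induction l with
  | nil =>
      intro fuel cur acc h
      match fuel, h with
      | fuel + 1, _ => simp [PySem.Chars.splitOn.go, pvNlSplit]
  | cons c rest ih =>
      intro fuel cur acc h
      match fuel, h with
      | fuel + 1, h =>
        by_cases hc : c = '\n'
        · subst hc
          rw [PySem.Chars.splitOn.go]
          simp only [List.isPrefixOf, BEq.rfl, Bool.true_and, List.isPrefixOf_nil_left, if_pos rfl]
          have : List.drop ['\n'].length ('\n' :: rest) = rest := by simp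
          rw [this, ih fuel [] (cur.reverse :: acc) (by simpa using h)]
          cases he : pvNlSplit rest <;> simp [pvNlSplit, he]
        · rw [PySem.Chars.splitOn.go]
          have hpre : ['\n'].isPrefixOf (c :: rest) = false := by
            simp [List.isPrefixOf]
            exact fun he => absurd he.symm hc
          rw [hpre]
          simp only [Bool.false_eq_true, if_false]
          rw [ih fuel (c :: cur) acc (by simpa using h)]
          obtain ⟨h0, r, hr⟩ : ∃ h0 r, pvNlSplit rest = h0 :: r := by
            cases he : pvNlSplit rest with
            | nil => exact absurd he (pvNlSplit_ne_nil rest)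
            | cons a b => exact ⟨a, b, rfl⟩
          simp [pvNlSplit, hc, hr]
  
lemma pvSplitOn_newline (cs : List Char) :
    PySem.Chars.splitOn cs ['\n'] = pvNlSplit cs := by
  have h := pvGo_spec cs (cs.length + 1) [] [] (by omega)
  unfold PySem.Chars.splitOn
  rw [h]
  cases he : pvNlSplit cs <;> simp

-- unfolding pvNlSplit via takeWhile/dropWhile (the shape pvLoopB follows)
lemma pvNlSplit_nonl (cs : List Char) (h : cs.dropWhile (· != '\n') = []) :
    pvNlSplit cs = [cs] := by
  induction cs with
  | nil => simp [pvNlSplit]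
  | cons c t ih =>
      by_cases hc : c = '\n'
      · have hb : (c != '\n') = false := by simp [hc]
        simp [List.dropWhile, hb] at h
      · have hb : (c != '\n') = true := by simp [hc]
        simp only [List.dropWhile, hb] at h
        simp [pvNlSplit, hc, ih h]

lemma pvNlSplit_cons (cs : List Char) (x : Char) (t0 : List Char)
    (h : cs.dropWhile (· != '\n') = x :: t0) :
    pvNlSplit cs = cs.takeWhile (· != '\n') :: pvNlSplit t0 := by
  induction cs with
  | nil => simp [List.dropWhile] at h
  | cons c t ih =>
      by_cases hc : c = '\n'
      · have hb : (c != '\n') = false := by simp [hc]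
        simp only [List.dropWhile, hb] at h
        simp only [List.cons.injEq] at h
        simp [pvNlSplit, List.takeWhile, hb, hc, h.2]
      · have hb : (c != '\n') = true := by simp [hc]
        simp only [List.dropWhile, hb] at h
        simp [pvNlSplit, List.takeWhile, hb, hc, ih h]

lemma pvJoin_nlSplit (cs : List Char) :
    PySem.Chars.join ['\n'] (pvNlSplit cs) = cs := by
  induction cs with
  | nil => simp [pvNlSplit, PySem.Chars.join, List.intercalate]
  | cons c t ih =>
      obtain ⟨h0, r, hr⟩ : ∃ h0 r, pvNlSplit t = h0 :: r := by
        cases he : pvNlSplit t with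
        | nil => exact absurd he (pvNlSplit_ne_nil t)
        | cons a b => exact ⟨a, b, rfl⟩
      by_cases hc : c = '\n'
      · subst hc
        rw [show pvNlSplit ('\n' :: t) = [] :: pvNlSplit t from by simp [pvNlSplit],
          hr, PySem.Chars.join_cons_cons, ← hr, ih]
        simp
      · rw [hr] at ih
        cases r with
        | nil =>
            simp [PySem.Chars.join, List.intercalate] at ih
            simp [pvNlSplit, hc, hr, PySem.Chars.join, List.intercalate, ih]
        | cons q r' =>
            rw [PySem.Chars.join_cons_cons] at ih
            simp [pvNlSplit, hc, hr, PySem.Chars.join_cons_cons]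
            simpa using ih

-- boundary: number of leading import lines
def pvBoundC : List (List Char) → Nat
  | [] => 0
  | l :: rest => if pvIsImportC l then pvBoundC rest + 1 else 0

-- what pvLoopB accumulates as the import prefix
def pvFml (cs : List Char) : List Char :=
  let L := pvNlSplit cs
  let i := pvBoundC L
  if i = 0 then [] else
    PySem.Chars.join ['\n'] (L.take i) ++ (if i < L.length then ['\n'] else [])

lemma pvFml_cons (rest : List Char) (x : Char) (tail : List Char)
    (hd : rest.dropWhile (· != '\n') = x :: tail)
    (hi : pvIsImportC (rest.takeWhile (· != '\n')) = true) :
    pvFml rest = rest.takeWhile (· != '\n') ++ '\n' :: pvFml tail := by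
  have hpos : 0 < (pvNlSplit tail).length :=
    List.length_pos_iff.mpr (pvNlSplit_ne_nil tail)
  unfold pvFml
  rw [pvNlSplit_cons rest x tail hd]
  simp only [pvBoundC, hi, if_true]
  by_cases h0' : pvBoundC (pvNlSplit tail) = 0
  · rw [h0']
    simp only [List.take_succ_cons, List.take_zero, Nat.zero_add, List.length_cons]
    rw [if_neg (by omega : ¬ (1 : Nat) = 0), if_pos (by omega : 1 < (pvNlSplit tail).length + 1)]
    simp [PySem.Chars.join, List.intercalate]
  · obtain ⟨q, rq, hq⟩ : ∃ q rq, (pvNlSplit tail).take (pvBoundC (pvNlSplit tail)) = q :: rq := by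
      cases he : (pvNlSplit tail).take (pvBoundC (pvNlSplit tail)) with
      | nil =>
          rw [List.take_eq_nil_iff] at he
          rcases he with h | h
          · exact absurd h h0'
          · exact absurd h (pvNlSplit_ne_nil tail)
      | cons a b => exact ⟨a, b, rfl⟩
    rw [if_neg (by omega : ¬ pvBoundC (pvNlSplit tail) + 1 = 0), if_neg h0']
    rw [List.take_succ_cons, hq, PySem.Chars.join_cons_cons, ← hq]
    simp only [List.length_cons, Nat.add_lt_add_iff_right]
    simp

lemma pvLoopB_spec (imports rest : List Char) :
    pvLoopB imports rest
      = (imports ++ pvFml rest,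
         PySem.Chars.join ['\n'] ((pvNlSplit rest).drop (pvBoundC (pvNlSplit rest)))) := by
  induction imports, rest using pvLoopB.induct with
  | case1 imports rest head hni =>
      rw [pvLoopB]
      rw [if_pos hni]
      have hni' : ¬ pvIsImportC (rest.takeWhile (· != '\n')) = true := hni
      cases hd : rest.dropWhile (· != '\n') with
      | nil =>
          have ht : rest.takeWhile (· != '\n') = rest := by
            have := List.takeWhile_append_dropWhile (p := (· != '\n')) (l := rest)
            rw [hd] at this; simpa using this
          rw [ht] at hni'
          simp [pvFml, pvNlSplit_nonl rest hd, pvBoundC, hni', PySem.Chars.join,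
            List.intercalate, pvJoin_nlSplit]
      | cons x t0 =>
          simp [pvFml, pvNlSplit_cons rest x t0 hd, pvBoundC, hni']
          have hj := pvJoin_nlSplit rest
          rw [pvNlSplit_cons rest x t0 hd] at hj
          exact hj.symm
  | case2 imports rest head hi hd =>
      rw [pvLoopB]
      rw [if_neg hi]
      have hi' : pvIsImportC (rest.takeWhile (· != '\n')) = true := by
        have h2 : ¬¬ pvIsImportC (rest.takeWhile (· != '\n')) = true := hi
        simpa using h2
      rw [hd]
      show (imports ++ rest.takeWhile (· != '\n'), ([] : List Char))
          = (imports ++ pvFml rest,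
             PySem.Chars.join ['\n'] ((pvNlSplit rest).drop (pvBoundC (pvNlSplit rest))))
      have ht : rest.takeWhile (· != '\n') = rest := by
        have := List.takeWhile_append_dropWhile (p := (· != '\n')) (l := rest)
        rw [hd] at this; simpa using this
      rw [ht] at hi' ⊢
      simp [pvFml, pvNlSplit_nonl rest hd, pvBoundC, hi', PySem.Chars.join, List.intercalate]
  | case3 imports rest head hi x tail hd ih =>
      rw [pvLoopB]
      rw [if_neg hi]
      have hi' : pvIsImportC (rest.takeWhile (· != '\n')) = true := by
        have h2 : ¬¬ pvIsImportC (rest.takeWhile (· != '\n')) = true := hi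
        simpa using h2
      have ih' : pvLoopB (imports ++ rest.takeWhile (· != '\n') ++ ['\n']) tail
          = (imports ++ rest.takeWhile (· != '\n') ++ ['\n'] ++ pvFml tail,
             PySem.Chars.join ['\n'] ((pvNlSplit tail).drop (pvBoundC (pvNlSplit tail)))) := ih
      rw [hd]
      show pvLoopB (imports ++ rest.takeWhile (· != '\n') ++ ['\n']) tail
          = (imports ++ pvFml rest,
             PySem.Chars.join ['\n'] ((pvNlSplit rest).drop (pvBoundC (pvNlSplit rest))))
      rw [ih']
      rw [pvNlSplit_cons rest x tail hd]
      rw [Prod.mk.injEq]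
      constructor
      · -- first component
        rw [pvFml_cons rest x tail hd hi']
        simp
      · -- second component
        simp only [pvNlSplit_cons rest x tail hd, pvBoundC, hi', if_true, List.drop_succ_cons]

-- Chars.strip ignores a trailing newline
lemma pvStrip_newline (x : List Char) :
    PySem.Chars.strip (x ++ ['\n']) = PySem.Chars.strip x := by
  have hn : PySem.Chars.isspace '\n' = true := by decide
  unfold PySem.Chars.strip PySem.Chars.rstrip PySem.Chars.lstrip
  rw [List.dropWhile_append]
  by_cases he : (x.dropWhile PySem.Chars.isspace).isEmpty
  · simp only [he, if_true, List.dropWhile, hn]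
    simp only [List.isEmpty_iff] at he
    simp [he]
  · simp only [he, Bool.false_eq_true, if_false, List.reverse_append, List.reverse_cons,
      List.reverse_nil, List.nil_append, List.singleton_append, List.dropWhile, hn]

-- bridge: A's string-level predicate is B's char-level one
lemma pvIsImport_ofList (l : List Char) :
    pvIsImport (String.ofList l) = pvIsImportC l := by
  have he : (String.ofList l == "") = l.isEmpty := by
    cases l with
    | nil => rfl
    | cons c t =>
        simp only [List.isEmpty_cons]
        rw [Bool.eq_false_iff]
        intro hcon
        have : String.ofList (c :: t) = "" := by
          exact eq_of_beq hcon
        have h2 : (String.ofList (c :: t)).toList = ("" : String).toList := by rw [this]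
        simp at h2
  simp [pvIsImport, pvIsImportC, PySem.Str.startswith, PySem.Str.strIsspace, he]

-- A's loop: once inside_imports is false, every remaining line goes to code
lemma pvLoopA_false (lines : List String) (I C : List String) :
    pvLoopA (false, I, C) lines = (false, I, C ++ lines) := by
  induction lines generalizing C with
  | nil => simp [pvLoopA]
  | cons l rest ih =>
      have hstep : pvLoopA (false, I, C) (l :: rest) = pvLoopA (false, I, C ++ [l]) rest := by
        by_cases h : pvIsImport l = true <;> simp [pvLoopA, h]
      rw [hstep, ih]
      simp

-- A's per-line boundary counter, on the string side
def pvBoundS : List String → Nat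
  | [] => 0
  | l :: rest => if pvIsImport l then pvBoundS rest + 1 else 0

lemma pvBoundS_map (L : List (List Char)) : pvBoundS (L.map String.ofList) = pvBoundC L := by
  induction L with
  | nil => simp [pvBoundS, pvBoundC]
  | cons l r ih =>
      by_cases h : pvIsImportC l <;>
        simp [pvBoundS, pvBoundC, pvIsImport_ofList, h, ih]

-- while inside_imports is true, A's loop splits at the boundary
lemma pvLoopA_true (lines : List String) : ∀ (I C : List String),
    pvLoopA (true, I, C) lines =
      ((pvLoopA (true, I, C) lines).1,
       I ++ lines.take (pvBoundS lines), C ++ lines.drop (pvBoundS lines)) := by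
  induction lines with
  | nil => intro I C; simp [pvLoopA, pvBoundS]
  | cons l rest ih =>
      intro I C
      by_cases h : pvIsImport l = true
      · have hstep : pvLoopA (true, I, C) (l :: rest)
            = pvLoopA (true, I ++ [l], C) rest := by
          simp [pvLoopA, h]
        rw [hstep, ih]
        simp [pvBoundS, h, List.append_assoc]
      · have hstep : pvLoopA (true, I, C) (l :: rest)
            = pvLoopA (false, I, C ++ [l]) rest := by
          simp [pvLoopA, h]
        rw [hstep, pvLoopA_false]
        simp [pvBoundS, h, List.append_assoc]

-- strip of B's accumulated prefix = strip of A's joined import lines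
lemma pvStrip_fml (cs : List Char) :
    PySem.Chars.strip (pvFml cs)
      = PySem.Chars.strip
          (PySem.Chars.join ['\n'] ((pvNlSplit cs).take (pvBoundC (pvNlSplit cs)))) := by
  unfold pvFml
  by_cases h0 : pvBoundC (pvNlSplit cs) = 0
  · simp [h0]
  · by_cases hlt : pvBoundC (pvNlSplit cs) < (pvNlSplit cs).length
    · simp [h0, hlt, pvStrip_newline]
    · simp [h0, hlt]

-- joining+stripping mapped string lines = ofList of the char-side join+strip
lemma pvJoinStr (M : List (List Char)) :
    PySem.Str.strip (PySem.Str.join "\n" (M.map String.ofList))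
      = String.ofList (PySem.Chars.strip (PySem.Chars.join ['\n'] M)) := by
  have hnl : ("\n" : String).toList = ['\n'] := rfl
  unfold PySem.Str.strip PySem.Str.join
  rw [String.toList_ofList, hnl, List.map_map]
  have hco : (String.toList ∘ String.ofList) = id := by
    funext l; exact String.toList_ofList
  rw [hco, List.map_id]

-- ===== VERDICT (by name: the statement is the Claim_ definition above) =====
theorem split_imports_spec : Claim_equal_split_imports := by
  intro text _
  unfold Spec_split_imports
  simp only [split_imports, split_imports_alt]
  have hnl : ("\n" : String).toList = ['\n'] := rfl
  have hsplit : (PySem.Str.split? text "\n").getD []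
      = (pvNlSplit text.toList).map String.ofList := by
    simp [PySem.Str.split?, PySem.Chars.split?, hnl, pvSplitOn_newline]
  rw [hsplit, pvLoopA_true, pvLoopB_spec]
  simp only [List.nil_append, Prod.mk.injEq]
  rw [pvBoundS_map]
  constructor
  · rw [← List.map_take, pvJoinStr, pvStrip_fml]
  · rw [← List.map_drop, pvJoinStr]
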